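-- pv_equiv track=rewrite | github.com/Siloid/advent-of-code | 2025/Day05/main.py | count_fresh_ingredients
-- ===== SOURCE A (Python) =====
-- def count_fresh_ingredients(fresh_ranges, ingredients):
--     fresh_counter = 0
--     for ingredient in ingredients:
--         for begin, end in fresh_ranges:
--             if ingredient >= begin and ingredient <= end:
--                 fresh_counter += 1
--                 break
--     return fresh_counter
-- ===== SOURCE B (Python) =====
-- def count_fresh_ingredients(fresh_ranges, ingredients):
--     # sort the non-empty ranges by start, merge overlaps, then binary-search each ingredient
--     intervals = sorted((r for r in fresh_ranges if r[0] <= r[1]), key=lambda r: r[0])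
--     merged = []
--     cur = None
--     for b, e in intervals:
--         if cur is None:
--             cur = (b, e)
--         elif b <= cur[1]:
--             cur = (cur[0], max(cur[1], e))
--         else:
--             merged.append(cur)
--             cur = (b, e)
--     if cur is not None:
--         merged.append(cur)
--     starts = [p[0] for p in merged]
--     count = 0
--     for x in ingredients:
--         lo, hi = 0, len(starts)
--         while lo < hi:
--             mid = (lo + hi) // 2
--             if starts[mid] <= x:
--                 lo = mid + 1
--             else:
--                 hi = mid
--         if lo > 0 and x <= merged[lo - 1][1]:
--             count += 1
--     return count
-- ===== Notes on version B (the rewrite author's own statement) =====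
-- stated objective: faster
-- what changed: Instead of scanning all ranges for every ingredient, B sorts the ranges once, merges them into disjoint intervals, and decides each ingredient by binary search over the merged starts.
import Mathlib
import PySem

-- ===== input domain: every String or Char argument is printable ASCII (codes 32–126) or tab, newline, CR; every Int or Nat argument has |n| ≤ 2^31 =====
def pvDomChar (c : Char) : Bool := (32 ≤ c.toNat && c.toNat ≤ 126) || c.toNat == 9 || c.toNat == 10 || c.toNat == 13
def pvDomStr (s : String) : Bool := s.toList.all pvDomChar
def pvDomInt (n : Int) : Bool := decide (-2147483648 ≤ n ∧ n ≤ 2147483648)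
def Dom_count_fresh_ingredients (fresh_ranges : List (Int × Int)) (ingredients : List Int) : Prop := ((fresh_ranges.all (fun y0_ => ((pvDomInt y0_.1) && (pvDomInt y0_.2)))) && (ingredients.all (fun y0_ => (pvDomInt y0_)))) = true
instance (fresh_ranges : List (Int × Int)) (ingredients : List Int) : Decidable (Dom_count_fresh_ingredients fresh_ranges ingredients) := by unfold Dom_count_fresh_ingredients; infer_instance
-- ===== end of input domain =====

-- B replaces A's scan of all ranges per ingredient by sort + merge of the ranges once and a
-- binary search per ingredient (objective: faster, asymptotic).

-- ===== PORT A =====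
-- inner 'for begin, end in fresh_ranges: … break' loop of A
def pvInnerA (ingredient : Int) (c : Int) : List (Int × Int) → Int
  | [] => c
  | r :: rest => if ingredient ≥ r.1 ∧ ingredient ≤ r.2 then c + 1 else pvInnerA ingredient c rest

def count_fresh_ingredients (fresh_ranges : List (Int × Int)) (ingredients : List Int) : Int :=
  ingredients.foldl (fun fresh_counter ingredient => pvInnerA ingredient fresh_counter fresh_ranges) 0

-- ===== PORT B =====
-- one iteration of Source B's merge loop; state = (merged, cur)
def pvMergeStep (st : List (Int × Int) × Option (Int × Int)) (r : Int × Int) : List (Int × Int) × Option (Int × Int) :=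
  match st.2 with
  | none => (st.1, some r)
  | some c => if r.1 ≤ c.2 then (st.1, some (c.1, max c.2 r.2)) else (st.1 ++ [c], some r)

-- Source B's trailing 'if cur is not None: merged.append(cur)'
def pvFinalize (st : List (Int × Int) × Option (Int × Int)) : List (Int × Int) :=
  match st.2 with
  | none => st.1
  | some c => st.1 ++ [c]

-- Source B's hand-written 'while lo < hi' binary search
def pvBsearch (starts : List Int) (x : Int) (lo hi : Nat) : Nat :=
  if h : lo < hi then
    let mid := (lo + hi) / 2
    if PySem.List.pyGetD starts (mid : Int) 0 ≤ x then pvBsearch starts x (mid + 1) hi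
    else pvBsearch starts x lo mid
  else lo
termination_by hi - lo
decreasing_by all_goals omega

def count_fresh_ingredients_alt (fresh_ranges : List (Int × Int)) (ingredients : List Int) : Int :=
  let intervals := PySem.List.sorted (fresh_ranges.filter (fun r => decide (r.1 ≤ r.2))) (fun r => r.1) false
  let merged := pvFinalize (intervals.foldl pvMergeStep ([], none))
  let starts := merged.map (fun p => p.1)
  ingredients.foldl (fun count x =>
    let lo := pvBsearch starts x 0 starts.length
    if 0 < lo ∧ x ≤ (PySem.List.pyGetD merged ((lo : Int) - 1) ((0 : Int), (0 : Int))).2 then count + 1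
    else count) 0

-- ===== PRECONDITION & SPEC =====
def Spec_count_fresh_ingredients (fresh_ranges : List (Int × Int)) (ingredients : List Int) (out : Int) : Prop := out = count_fresh_ingredients_alt fresh_ranges ingredients
instance (fresh_ranges : List (Int × Int)) (ingredients : List Int) (out : Int) : Decidable (Spec_count_fresh_ingredients fresh_ranges ingredients out) := by unfold Spec_count_fresh_ingredients; infer_instance

-- ===== CLAIM (what is proved, stated in full; the proofs are below) =====
def Claim_equal_count_fresh_ingredients : Prop := ∀ (fresh_ranges : List (Int × Int)) (ingredients : List Int), Dom_count_fresh_ingredients fresh_ranges ingredients → Spec_count_fresh_ingredients fresh_ranges ingredients (count_fresh_ingredients fresh_ranges ingredients)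

-- ===== LEMMAS AND PROOFS =====

theorem pvInnerA_eq (x c : Int) (l : List (Int × Int)) :
    pvInnerA x c l = if ∃ p ∈ l, p.1 ≤ x ∧ x ≤ p.2 then c + 1 else c := by
  induction l with
  | nil => simp [pvInnerA]
  | cons hd tl ih =>
    rw [pvInnerA, ih]
    by_cases h1 : x ≥ hd.1 ∧ x ≤ hd.2
    · rw [if_pos h1, if_pos ⟨hd, List.mem_cons_self, h1.1, h1.2⟩]
    · rw [if_neg h1]
      by_cases h2 : ∃ p ∈ tl, p.1 ≤ x ∧ x ≤ p.2
      · obtain ⟨p, hp, hx⟩ := h2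
        rw [if_pos ⟨p, hp, hx⟩, if_pos ⟨p, List.mem_cons_of_mem _ hp, hx⟩]
      · rw [if_neg h2, if_neg]
        rintro ⟨p, hp, hx⟩
        rcases List.mem_cons.1 hp with h | h
        · exact h1 (h ▸ ⟨hx.1, hx.2⟩)
        · exact h2 ⟨p, h, hx⟩

theorem pvPairwise_snoc {α : Type} {R : α → α → Prop} {l : List α} {c : α}
    (h : l.Pairwise R) (h2 : ∀ p ∈ l, R p c) : (l ++ [c]).Pairwise R := by
  refine List.pairwise_append.2 ⟨h, List.pairwise_singleton _ _, ?_⟩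
  intro a ha b hb
  rw [List.mem_singleton] at hb
  exact hb ▸ h2 a ha

-- master invariant of Source B's merge loop
theorem pvMerge_master :
    ∀ (l acc : List (Int × Int)) (cur : Option (Int × Int)),
    l.Pairwise (fun a b => a.1 ≤ b.1) →
    (∀ r ∈ l, r.1 ≤ r.2) →
    acc.Pairwise (fun p q => p.2 < q.1) →
    (∀ p ∈ acc, p.1 ≤ p.2) →
    (match cur with
     | none => acc = []
     | some c => c.1 ≤ c.2 ∧ (∀ p ∈ acc, p.2 < c.1) ∧ (∀ r ∈ l, c.1 ≤ r.1)) →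
    (pvFinalize (l.foldl pvMergeStep (acc, cur))).Pairwise (fun p q => p.2 < q.1) ∧
    (∀ p ∈ pvFinalize (l.foldl pvMergeStep (acc, cur)), p.1 ≤ p.2) ∧
    (∀ x : Int, (∃ p ∈ pvFinalize (l.foldl pvMergeStep (acc, cur)), p.1 ≤ x ∧ x ≤ p.2) ↔
      ((∃ p ∈ acc, p.1 ≤ x ∧ x ≤ p.2) ∨ (∃ c, cur = some c ∧ c.1 ≤ x ∧ x ≤ c.2) ∨
       (∃ r ∈ l, r.1 ≤ x ∧ x ≤ r.2))) := by
  intro l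
  induction l with
  | nil =>
    intro acc cur _ _ hacc hval hcur
    cases cur with
    | none =>
      refine ⟨by simpa [pvFinalize] using hacc, by simpa [pvFinalize] using hval, fun x => ?_⟩
      simp [pvFinalize]
    | some c =>
      obtain ⟨hc12, haccc, -⟩ := hcur
      refine ⟨?_, ?_, fun x => ?_⟩
      · exact pvPairwise_snoc hacc haccc
      · intro p hp
        rcases List.mem_append.1 hp with h | h
        · exact hval p h
        · rw [List.mem_singleton] at h; exact h ▸ hc12
      · simp only [pvFinalize, List.foldl_nil]
        constructor
        · rintro ⟨p, hp, hx⟩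
          rcases List.mem_append.1 hp with h | h
          · exact Or.inl ⟨p, h, hx⟩
          · rw [List.mem_singleton] at h
            exact Or.inr (Or.inl ⟨c, rfl, h ▸ hx⟩)
        · rintro (⟨p, hp, hx⟩ | ⟨c', hc', hx⟩ | ⟨r, hr, _⟩)
          · exact ⟨p, List.mem_append.2 (Or.inl hp), hx⟩
          · obtain rfl : c = c' := Option.some.inj hc'
            exact ⟨c, List.mem_append.2 (Or.inr (List.mem_singleton.2 rfl)), hx⟩
          · exact absurd hr List.not_mem_nil
  | cons r tl ih =>
    intro acc cur hsort hvals hacc hval hcur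
    have hsort' : tl.Pairwise (fun a b => a.1 ≤ b.1) := (List.pairwise_cons.1 hsort).2
    have hhead : ∀ b ∈ tl, r.1 ≤ b.1 := (List.pairwise_cons.1 hsort).1
    have hr : r.1 ≤ r.2 := hvals r List.mem_cons_self
    have hvals' : ∀ b ∈ tl, b.1 ≤ b.2 := fun b hb => hvals b (List.mem_cons_of_mem _ hb)
    cases cur with
    | none =>
      have hacc0 : acc = [] := hcur
      subst hacc0
      rw [List.foldl_cons, show pvMergeStep ([], none) r = ([], some r) from rfl]
      obtain ⟨h1, h2, h3⟩ := ih [] (some r) hsort' hvals' (by simp) (by simp)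
        ⟨hr, by simp, hhead⟩
      refine ⟨h1, h2, fun x => ?_⟩
      rw [h3 x]
      constructor
      · rintro (h | ⟨c, hc, hx⟩ | ⟨p, hp, hx⟩)
        · simp at h
        · obtain rfl : r = c := Option.some.inj hc
          exact Or.inr (Or.inr ⟨r, List.mem_cons_self, hx⟩)
        · exact Or.inr (Or.inr ⟨p, List.mem_cons_of_mem _ hp, hx⟩)
      · rintro (h | ⟨c, hc, hx⟩ | ⟨p, hp, hx⟩)
        · simp at h
        · exact absurd hc (by simp)
        · rcases List.mem_cons.1 hp with h | h
          · exact Or.inr (Or.inl ⟨r, rfl, h ▸ hx⟩)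
          · exact Or.inr (Or.inr ⟨p, h, hx⟩)
    | some c =>
      obtain ⟨hc12, haccc, hcle⟩ := hcur
      have hcr1 : c.1 ≤ r.1 := hcle r List.mem_cons_self
      by_cases hm : r.1 ≤ c.2
      · rw [List.foldl_cons,
          show pvMergeStep (acc, some c) r = (acc, some (c.1, max c.2 r.2)) from by
            simp [pvMergeStep, hm]]
        obtain ⟨h1, h2, h3⟩ := ih acc (some (c.1, max c.2 r.2)) hsort' hvals' hacc hval
          ⟨le_trans hc12 (le_max_left _ _), haccc, fun b hb => hcle b (List.mem_cons_of_mem _ hb)⟩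
        refine ⟨h1, h2, fun x => ?_⟩
        rw [h3 x]
        constructor
        · rintro (h | ⟨c', hc', hx⟩ | ⟨p, hp, hx⟩)
          · exact Or.inl h
          · obtain rfl : (c.1, max c.2 r.2) = c' := Option.some.inj hc'
            rcases le_or_gt x c.2 with hx2 | hx2
            · exact Or.inr (Or.inl ⟨c, rfl, hx.1, hx2⟩)
            · refine Or.inr (Or.inr ⟨r, List.mem_cons_self, le_trans hm (le_of_lt hx2), ?_⟩)
              have h2' := hx.2
              simp only [max_def] at h2'
              split_ifs at h2' <;> omega
          · exact Or.inr (Or.inr ⟨p, List.mem_cons_of_mem _ hp, hx⟩)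
        · rintro (h | ⟨c', hc', hx⟩ | ⟨p, hp, hx⟩)
          · exact Or.inl h
          · obtain rfl : c = c' := Option.some.inj hc'
            exact Or.inr (Or.inl ⟨_, rfl, hx.1, le_trans hx.2 (le_max_left _ _)⟩)
          · rcases List.mem_cons.1 hp with h | h
            · subst h
              exact Or.inr (Or.inl ⟨_, rfl, le_trans hcr1 hx.1, le_trans hx.2 (le_max_right _ _)⟩)
            · exact Or.inr (Or.inr ⟨p, h, hx⟩)
      · rw [List.foldl_cons,
          show pvMergeStep (acc, some c) r = (acc ++ [c], some r) from by
            simp [pvMergeStep, hm]]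
        have hacc' : (acc ++ [c]).Pairwise (fun p q => p.2 < q.1) := pvPairwise_snoc hacc haccc
        have hval' : ∀ p ∈ acc ++ [c], p.1 ≤ p.2 := by
          intro p hp
          rcases List.mem_append.1 hp with h | h
          · exact hval p h
          · rw [List.mem_singleton] at h; exact h ▸ hc12
        have hsep : ∀ p ∈ acc ++ [c], p.2 < r.1 := by
          intro p hp
          rcases List.mem_append.1 hp with h | h
          · exact lt_of_lt_of_le (haccc p h) hcr1
          · rw [List.mem_singleton] at h; subst h; omega
        obtain ⟨h1, h2, h3⟩ := ih (acc ++ [c]) (some r) hsort' hvals' hacc' hval' ⟨hr, hsep, hhead⟩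
        refine ⟨h1, h2, fun x => ?_⟩
        rw [h3 x]
        constructor
        · rintro (⟨p, hp, hx⟩ | ⟨c', hc', hx⟩ | ⟨p, hp, hx⟩)
          · rcases List.mem_append.1 hp with h | h
            · exact Or.inl ⟨p, h, hx⟩
            · rw [List.mem_singleton] at h
              exact Or.inr (Or.inl ⟨c, rfl, h ▸ hx⟩)
          · obtain rfl : r = c' := Option.some.inj hc'
            exact Or.inr (Or.inr ⟨r, List.mem_cons_self, hx⟩)
          · exact Or.inr (Or.inr ⟨p, List.mem_cons_of_mem _ hp, hx⟩)
        · rintro (⟨p, hp, hx⟩ | ⟨c', hc', hx⟩ | ⟨p, hp, hx⟩)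
          · exact Or.inl ⟨p, List.mem_append.2 (Or.inl hp), hx⟩
          · obtain rfl : c = c' := Option.some.inj hc'
            exact Or.inl ⟨c, List.mem_append.2 (Or.inr (List.mem_singleton.2 rfl)), hx⟩
          · rcases List.mem_cons.1 hp with h | h
            · exact Or.inr (Or.inl ⟨r, rfl, h ▸ hx⟩)
            · exact Or.inr (Or.inr ⟨p, h, hx⟩)

-- binary-search invariant of Source B's while loop
theorem pvBsearch_spec (starts : List Int) (x : Int)
    (hmono : ∀ i j : Nat, i ≤ j → j < starts.length → starts.getD i 0 ≤ starts.getD j 0) :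
    ∀ (n lo hi : Nat), hi - lo ≤ n → lo ≤ hi → hi ≤ starts.length →
    (∀ i < lo, starts.getD i 0 ≤ x) →
    (∀ i, hi ≤ i → i < starts.length → x < starts.getD i 0) →
    pvBsearch starts x lo hi ≤ starts.length ∧
    (∀ i < pvBsearch starts x lo hi, starts.getD i 0 ≤ x) ∧
    (∀ i, pvBsearch starts x lo hi ≤ i → i < starts.length → x < starts.getD i 0) := by
  intro n
  induction n with
  | zero =>
    intro lo hi hn hlh hhi hlow hhigh
    have : lo = hi := by omega
    subst this
    rw [pvBsearch]
    simp only [lt_irrefl, dite_false]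
    exact ⟨hhi, hlow, fun i h1 h2 => hhigh i h1 h2⟩
  | succ n ih =>
    intro lo hi hn hlh hhi hlow hhigh
    rw [pvBsearch]
    by_cases h : lo < hi
    · rw [dif_pos h]
      have hmid1 : lo ≤ (lo + hi) / 2 := by omega
      have hmid2 : (lo + hi) / 2 < hi := by omega
      have hget : PySem.List.pyGetD starts (((lo + hi) / 2 : Nat) : Int) 0 =
          starts.getD ((lo + hi) / 2) 0 := PySem.List.pyGetD_natCast starts ((lo + hi) / 2) 0
      by_cases hle : PySem.List.pyGetD starts (((lo + hi) / 2 : Nat) : Int) 0 ≤ x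
      · rw [if_pos hle]
        refine ih ((lo + hi) / 2 + 1) hi (by omega) (by omega) hhi ?_ hhigh
        intro i hi'
        rcases lt_or_ge i lo with h' | h'
        · exact hlow i h'
        · have : starts.getD i 0 ≤ starts.getD ((lo + hi) / 2) 0 :=
            hmono i ((lo + hi) / 2) (by omega) (by omega)
          rw [hget] at hle; omega
      · rw [if_neg hle]
        refine ih lo ((lo + hi) / 2) (by omega) (by omega) (by omega) hlow ?_
        intro i h1 h2
        have : starts.getD ((lo + hi) / 2) 0 ≤ starts.getD i 0 := hmono _ i h1 h2
        rw [hget] at hle; omega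
    · rw [dif_neg h]
      have : lo = hi := by omega
      subst this
      exact ⟨hhi, hlow, fun i h1 h2 => hhigh i h1 h2⟩

-- correctness of B's per-ingredient lookup on a merged (separated, nonempty-interval) list
theorem pvLookup_iff (M : List (Int × Int)) (x : Int)
    (hch : M.Pairwise (fun p q => p.2 < q.1)) (hv : ∀ p ∈ M, p.1 ≤ p.2) :
    (0 < pvBsearch (M.map (fun p => p.1)) x 0 (M.map (fun p => p.1)).length ∧
     x ≤ (PySem.List.pyGetD M
       ((pvBsearch (M.map (fun p => p.1)) x 0 (M.map (fun p => p.1)).length : Int) - 1)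
       ((0 : Int), (0 : Int))).2) ↔
    ∃ p ∈ M, p.1 ≤ x ∧ x ≤ p.2 := by
  set starts := M.map (fun p => p.1) with hstarts
  have hlen : starts.length = M.length := by simp [hstarts]
  have hsget : ∀ i (h : i < M.length), starts.getD i 0 = (M[i]'h).1 := by
    intro i h
    rw [List.getD_eq_getElem _ _ (by omega)]
    simp [hstarts]
  have hchar : ∀ i j (hi : i < M.length) (hj : j < M.length), i < j → (M[i]'hi).2 < (M[j]'hj).1 := by
    intro i j hi hj hij
    exact (List.pairwise_iff_getElem.1 hch) i j hi hj hij
  have hmono : ∀ i j : Nat, i ≤ j → j < starts.length → starts.getD i 0 ≤ starts.getD j 0 := by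
    intro i j hij hj
    rw [hlen] at hj
    rcases eq_or_lt_of_le hij with h | h
    · subst h; exact le_refl _
    · rw [hsget i (by omega), hsget j hj]
      have h1 := hv (M[i]'(by omega)) (List.getElem_mem _)
      have h2 := hchar i j (by omega) hj h
      omega
  obtain ⟨hr1, hr2, hr3⟩ := pvBsearch_spec starts x hmono starts.length 0 starts.length
    (by omega) (by omega) (le_refl _) (by omega) (fun i h1 h2 => by omega)
  set r := pvBsearch starts x 0 starts.length with hrdef
  constructor
  · rintro ⟨hpos, hle⟩
    have hrM : r - 1 < M.length := by omega
    have hgetM : PySem.List.pyGetD M ((r : Int) - 1) ((0 : Int), (0 : Int)) = M[r - 1]'hrM := by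
      have : (r : Int) - 1 = ((r - 1 : Nat) : Int) := by omega
      rw [this]
      rw [show PySem.List.pyGetD M ((r - 1 : Nat) : Int) ((0:Int),(0:Int)) = M.getD (r-1) ((0:Int),(0:Int)) from PySem.List.pyGetD_natCast M (r - 1) ((0 : Int), (0 : Int))]
      exact List.getD_eq_getElem _ _ hrM
    refine ⟨M[r - 1]'hrM, List.getElem_mem _, ?_, ?_⟩
    · have := hr2 (r - 1) (by omega)
      rw [hsget (r - 1) hrM] at this
      exact this
    · rw [hgetM] at hle; exact hle
  · rintro ⟨p, hp, hx1, hx2⟩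
    obtain ⟨i, hi, hpi⟩ := List.getElem_of_mem hp
    have hir : i < r := by
      by_contra hcon
      have := hr3 i (by omega) (by omega)
      rw [hsget i hi, hpi] at this
      omega
    have hpos : 0 < r := by omega
    have hrM : r - 1 < M.length := by omega
    have hieq : i = r - 1 := by
      by_contra hne
      have hilt : i < r - 1 := by omega
      have h1 := hchar i (r - 1) hi hrM hilt
      have h2 := hr2 (r - 1) (by omega)
      rw [hsget (r - 1) hrM] at h2
      rw [hpi] at h1
      omega
    subst hieq
    have hgetM : PySem.List.pyGetD M ((r : Int) - 1) ((0 : Int), (0 : Int)) = M[r - 1]'hrM := by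
      have : (r : Int) - 1 = ((r - 1 : Nat) : Int) := by omega
      rw [this]
      rw [show PySem.List.pyGetD M ((r - 1 : Nat) : Int) ((0:Int),(0:Int)) = M.getD (r-1) ((0:Int),(0:Int)) from PySem.List.pyGetD_natCast M (r - 1) ((0 : Int), (0 : Int))]
      exact List.getD_eq_getElem _ _ hrM
    have he : M[r - 1]'hrM = p := hpi
    refine ⟨hpos, ?_⟩
    rw [hgetM, he]
    exact hx2

-- ===== VERDICT (by name: the statement is the Claim_ definition above) =====
theorem count_fresh_ingredients_spec : Claim_equal_count_fresh_ingredients := by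
  intro fresh_ranges ingredients _
  unfold Spec_count_fresh_ingredients count_fresh_ingredients count_fresh_ingredients_alt
  set flt := fresh_ranges.filter (fun r => decide (r.1 ≤ r.2)) with hflt
  set intervals := PySem.List.sorted flt (fun r => r.1) false with hintervals
  have hsort : intervals.Pairwise (fun a b => a.1 ≤ b.1) := PySem.List.sorted_pairwise _ _
  have hvals : ∀ r ∈ intervals, r.1 ≤ r.2 := by
    intro r hr
    rw [hintervals, PySem.List.mem_sorted, hflt, List.mem_filter] at hr
    exact of_decide_eq_true hr.2
  obtain ⟨hM1, hM2, hM3⟩ := pvMerge_master intervals [] none hsort hvals (by simp) (by simp) rfl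
  set M := pvFinalize (intervals.foldl pvMergeStep ([], none)) with hM
  have hcov : ∀ x : Int, (∃ p ∈ M, p.1 ≤ x ∧ x ≤ p.2) ↔ ∃ p ∈ fresh_ranges, p.1 ≤ x ∧ x ≤ p.2 := by
    intro x
    rw [hM3 x]
    constructor
    · rintro (h | ⟨c, hc, _⟩ | ⟨p, hp, hx⟩)
      · simp at h
      · exact absurd hc (by simp)
      · rw [hintervals, PySem.List.mem_sorted, hflt, List.mem_filter] at hp
        exact ⟨p, hp.1, hx⟩
    · rintro ⟨p, hp, hx⟩
      refine Or.inr (Or.inr ⟨p, ?_, hx⟩)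
      rw [hintervals, PySem.List.mem_sorted, hflt, List.mem_filter]
      exact ⟨hp, decide_eq_true (le_trans hx.1 hx.2)⟩
  apply PySem.List.foldl_congr_mem
  intro c x _
  rw [pvInnerA_eq]
  simp only []
  by_cases hex : ∃ p ∈ fresh_ranges, p.1 ≤ x ∧ x ≤ p.2
  · rw [if_pos hex, if_pos (((pvLookup_iff M x hM1 hM2).2 ((hcov x).2 hex)))]
  · rw [if_neg hex, if_neg (fun h => hex ((hcov x).1 ((pvLookup_iff M x hM1 hM2).1 h)))]
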